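-- pv_equiv track=rewrite | github.com/ffpacheco/Uni | FP/exercise1_m.py | days_until_christmas
-- ===== SOURCE A (Python) =====
-- def days_until_christmas(date):
--     dd,mm,yyyy=date
--     daysmonth = {1: 31,2: 28,3: 31,4: 30,5: 31,6: 30,7: 31,8: 31,9: 30,10: 31,11: 30,12: 31}
--     year=364
--     dias=0
--     if mm!=12:
--         while mm!=12:
--             dias+=daysmonth[mm]
--             mm+=1
--     if dd<=25:
--         dias+=25-dd
--     elif dd>25: dias=364-(dd-25)
--     return dias
-- ===== SOURCE B (Python) =====
-- _CUM_TO_DEC1 = {1: 334, 2: 303, 3: 275, 4: 244, 5: 214, 6: 183,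
--                 7: 153, 8: 122, 9: 91, 10: 61, 11: 30, 12: 0}
--
-- def days_until_christmas(date):
--     dd, mm, yyyy = date
--     md = _CUM_TO_DEC1[mm]
--     return md + (25 - dd) if dd <= 25 else 389 - dd
-- ===== Notes on version B (the rewrite author's own statement) =====
-- stated objective: simpler
-- what changed: Replaces A's month-by-month while loop over a per-month days dict by a single O(1) lookup in a precomputed cumulative table (days from month start to Dec 1), then the same day branch as a conditional expression.
import Mathlib
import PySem

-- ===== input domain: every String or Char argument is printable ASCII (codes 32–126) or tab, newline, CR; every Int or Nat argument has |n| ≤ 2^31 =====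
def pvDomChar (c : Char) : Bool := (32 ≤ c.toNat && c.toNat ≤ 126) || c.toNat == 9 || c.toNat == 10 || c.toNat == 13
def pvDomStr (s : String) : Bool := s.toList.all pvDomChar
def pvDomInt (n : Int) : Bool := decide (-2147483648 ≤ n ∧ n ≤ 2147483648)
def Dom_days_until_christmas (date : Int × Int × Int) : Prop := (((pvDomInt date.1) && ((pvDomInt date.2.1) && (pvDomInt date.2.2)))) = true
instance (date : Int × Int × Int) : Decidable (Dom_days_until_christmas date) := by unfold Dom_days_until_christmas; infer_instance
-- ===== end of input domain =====

-- B replaces A's month-by-month while loop with a single O(1) lookup in a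
-- precomputed cumulative days-to-December table (objective: simpler).


-- ===== PORT A =====
-- the dict daysmonth
def pvDaysmonth : PySem.Dict Int Int :=
  PySem.Dict.ofList [(1,31),(2,28),(3,31),(4,30),(5,31),(6,30),(7,31),(8,31),(9,30),(10,31),(11,30),(12,31)]

-- the while loop 'while mm != 12: dias += daysmonth[mm]; mm += 1'.
-- daysmonth[mm] raises KeyError on a miss (excluded by Pre_); getD 0 and fuel 12
-- make the loop total — exact whenever 1 ≤ mm ≤ 12.
def pvLoopA : Nat → Int → Int → Int
  | 0, _, dias => dias
  | fuel + 1, mm, dias =>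
      if mm ≠ 12 then pvLoopA fuel (mm + 1) (dias + pvDaysmonth.getD mm 0) else dias

def days_until_christmas (date : Int × Int × Int) : Int :=
  let dd := date.1
  let mm := date.2.1
  let dias : Int := 0
  let dias := if mm ≠ 12 then pvLoopA 12 mm dias else dias
  if dd ≤ 25 then dias + (25 - dd)
  else if dd > 25 then 364 - (dd - 25)
  else dias

-- ===== PORT B =====
-- cumulative days from the start of each month to December 1st
def pvCumToDec1 : PySem.Dict Int Int :=
  PySem.Dict.ofList [(1,334),(2,303),(3,275),(4,244),(5,214),(6,183),(7,153),(8,122),(9,91),(10,61),(11,30),(12,0)]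

def days_until_christmas_alt (date : Int × Int × Int) : Int :=
  let dd := date.1
  let mm := date.2.1
  let md := pvCumToDec1.getD mm 0   -- _CUM_TO_DEC1[mm]; KeyError on a miss is excluded by Pre_
  if dd ≤ 25 then md + (25 - dd) else 389 - dd

-- ===== PRECONDITION & SPEC =====
-- A (and B) raise KeyError on any month outside 1..12; exactly those inputs are excluded.
def Pre_days_until_christmas (date : Int × Int × Int) : Prop := 1 ≤ date.2.1 ∧ date.2.1 ≤ 12
instance (date : Int × Int × Int) : Decidable (Pre_days_until_christmas date) := by unfold Pre_days_until_christmas; infer_instance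
def pvWitness_days_until_christmas : (Int × Int × Int) := (24, 12, 2020)

def Spec_days_until_christmas (date : Int × Int × Int) (out : Int) : Prop := out = days_until_christmas_alt date
instance (date : Int × Int × Int) (out : Int) : Decidable (Spec_days_until_christmas date out) := by unfold Spec_days_until_christmas; infer_instance

-- ===== CLAIM (what is proved, stated in full; the proofs are below) =====
def Claim_equal_days_until_christmas : Prop := ∀ (date : Int × Int × Int), Dom_days_until_christmas date → Pre_days_until_christmas date → Spec_days_until_christmas date (days_until_christmas date)

-- ===== LEMMAS AND PROOFS =====
-- For each admitted month, A's loop result equals B's table entry.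
lemma pvLoop_eq_cum (mm : Int) (h1 : 1 ≤ mm) (h2 : mm ≤ 12) :
    (if mm ≠ 12 then pvLoopA 12 mm 0 else 0) = pvCumToDec1.getD mm 0 := by
  interval_cases mm <;> decide

-- ===== VERDICT (by name: the statement is the Claim_ definition above) =====
theorem days_until_christmas_spec : Claim_equal_days_until_christmas := by
  intro ⟨dd, mm, yyyy⟩ _ ⟨h1, h2⟩
  show days_until_christmas (dd, mm, yyyy) = days_until_christmas_alt (dd, mm, yyyy)
  unfold days_until_christmas days_until_christmas_alt
  simp only
  rw [pvLoop_eq_cum mm h1 h2]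
  split_ifs with hle hgt <;> omega
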